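-- pv_equiv track=rewrite | github.com/sidb95/code-problems | hackerrank/practice/the-time-in-words.py | timeInWords
-- ===== SOURCE A (Python) =====
-- def timeInWords(h, m):
--     S1 = ["one", "two", "three", "four", "five", "six", "seven", "eight", "nine", "ten", "eleven", "twelve", "thirteen", "fourteen", "fifteen", "sixteen", "seventeen", "eighteen", "nineteen", "twenty"]
--     S2 = []
--     for i in range(0, 9):
--         str1 = "twenty "
--         str1 += S1[i]
--         S2.append(str1)
--     S1 += S2
--     if (m == 0):
--         return S1[h - 1] + " " + "o' clock"
--     elif (m == 15):
--         return ("quarter past ") + S1[h - 1]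
--     elif (m == 45):
--         return ("quarter to " + S1[h % 12])
--     elif (m == 30):
--         return ("half past ") + S1[h - 1]
--     elif (m < 30):
--         return S1[m - 1] + " minutes past " + S1[h - 1]
--     elif (m > 30):
--         return S1[60 - m - 1] + " minutes to " + S1[h % 12]
-- ===== SOURCE B (Python) =====
-- def timeInWords(h, m):
--     WORDS = ["one", "two", "three", "four", "five", "six", "seven", "eight",
--              "nine", "ten", "eleven", "twelve", "thirteen", "fourteen", "fifteen",
--              "sixteen", "seventeen", "eighteen", "nineteen", "twenty",
--              "twenty one", "twenty two", "twenty three", "twenty four", "twenty five",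
--              "twenty six", "twenty seven", "twenty eight", "twenty nine"]
--     # tiny template language: #h = 'past'-side hour word, #t = 'to'-side hour word,
--     # #m = minute-count word; everything else is a literal token
--     TEMPLATES = {
--         0:  ["#h", "o'", "clock"],
--         15: ["quarter", "past", "#h"],
--         30: ["half", "past", "#h"],
--         45: ["quarter", "to", "#t"],
--     }
--     if m in TEMPLATES:
--         tokens = TEMPLATES[m]
--     elif m < 30:
--         tokens = ["#m", "minutes", "past", "#h"]
--     else:
--         tokens = ["#m", "minutes", "to", "#t"]
--     out = []
--     for t in tokens:
--         if t == "#h":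
--             out.append(WORDS[h - 1])
--         elif t == "#t":
--             out.append(WORDS[h % 12])
--         elif t == "#m":
--             out.append(WORDS[(m if m < 30 else 60 - m) - 1])
--         else:
--             out.append(t)
--     return " ".join(out)
-- ===== Notes on version B (the rewrite author's own statement) =====
-- stated objective: alternative
-- what changed: Replaces A's runtime-built word table plus six-way return chain of string concatenations by a data-driven mini template language: a dict of token templates (with #h/#t/#m placeholders) selected by minute, a substitution loop over the tokens, and a final ' '.join.
import Mathlib
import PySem

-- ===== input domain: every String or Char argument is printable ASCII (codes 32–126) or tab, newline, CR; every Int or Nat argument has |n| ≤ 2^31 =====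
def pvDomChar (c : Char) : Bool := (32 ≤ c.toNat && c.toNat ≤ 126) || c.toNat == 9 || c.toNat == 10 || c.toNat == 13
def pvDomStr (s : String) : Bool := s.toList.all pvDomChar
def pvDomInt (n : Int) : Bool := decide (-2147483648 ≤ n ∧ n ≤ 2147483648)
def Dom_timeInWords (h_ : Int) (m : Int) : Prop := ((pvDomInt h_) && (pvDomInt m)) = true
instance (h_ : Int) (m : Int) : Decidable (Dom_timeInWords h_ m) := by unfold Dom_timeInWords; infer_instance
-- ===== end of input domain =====

-- B replaces A's runtime-built word table and six-way chain of string concatenations by a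
-- data-driven template table (#h/#t/#m placeholders), a substitution loop and a join; objective: alternative.

-- ===== PORT A =====
def pvS1base : List String :=
  ["one", "two", "three", "four", "five", "six", "seven", "eight", "nine", "ten",
   "eleven", "twelve", "thirteen", "fourteen", "fifteen", "sixteen", "seventeen",
   "eighteen", "nineteen", "twenty"]

def timeInWords (h_ : Int) (m : Int) : String :=
  let S1 := pvS1base
  -- for i in range(0, 9): str1 = "twenty "; str1 += S1[i]; S2.append(str1)
  let S2 := (PySem.List.pyRange 0 9 1).foldl
    (fun acc i => acc ++ [("twenty " ++ ((PySem.List.pyGet? S1 i).getD ""))]) []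
  let S1 := S1 ++ S2
  if m == 0 then ((PySem.List.pyGet? S1 (h_ - 1)).getD "") ++ " " ++ "o' clock"
  else if m == 15 then "quarter past " ++ ((PySem.List.pyGet? S1 (h_ - 1)).getD "")
  else if m == 45 then "quarter to " ++ ((PySem.List.pyGet? S1 (PySem.Int.mod h_ 12)).getD "")
  else if m == 30 then "half past " ++ ((PySem.List.pyGet? S1 (h_ - 1)).getD "")
  else if m < 30 then ((PySem.List.pyGet? S1 (m - 1)).getD "") ++ " minutes past " ++ ((PySem.List.pyGet? S1 (h_ - 1)).getD "")
  else ((PySem.List.pyGet? S1 (60 - m - 1)).getD "") ++ " minutes to " ++ ((PySem.List.pyGet? S1 (PySem.Int.mod h_ 12)).getD "")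

-- ===== PORT B =====
def pvWords : List String :=
  ["one", "two", "three", "four", "five", "six", "seven", "eight", "nine", "ten",
   "eleven", "twelve", "thirteen", "fourteen", "fifteen", "sixteen", "seventeen",
   "eighteen", "nineteen", "twenty", "twenty one", "twenty two", "twenty three",
   "twenty four", "twenty five", "twenty six", "twenty seven", "twenty eight", "twenty nine"]

-- the template table: #h = 'past'-side hour word, #t = 'to'-side hour word, #m = minute-count word
def pvTemplates : PySem.Dict Int (List String) := PySem.Dict.mk
  [(0, ["#h", "o'", "clock"]),
   (15, ["quarter", "past", "#h"]),
   (30, ["half", "past", "#h"]),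
   (45, ["quarter", "to", "#t"])]

def timeInWords_alt (h_ : Int) (m : Int) : String :=
  let tokens :=
    match PySem.Dict.get? pvTemplates m with
    | some t => t
    | none => if m < 30 then ["#m", "minutes", "past", "#h"]
              else ["#m", "minutes", "to", "#t"]
  -- for t in tokens: out.append(substitution of t)
  let out := tokens.foldl (fun acc t =>
    acc ++ [ if t == "#h" then (PySem.List.pyGet? pvWords (h_ - 1)).getD ""
             else if t == "#t" then (PySem.List.pyGet? pvWords (PySem.Int.mod h_ 12)).getD ""
             else if t == "#m" then (PySem.List.pyGet? pvWords ((if m < 30 then m else 60 - m) - 1)).getD ""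
             else t ]) []
  PySem.Str.join " " out

-- ===== PRECONDITION & SPEC =====
-- Pre_ is exactly the set of inputs on which the Python A returns (no IndexError): the word-table
-- lookups S1[h-1], S1[m-1], S1[60-m-1] must hit the 29-entry table (Python indexing, so from -29).
def Pre_timeInWords (h_ : Int) (m : Int) : Prop :=
  (m = 45 ∨ (30 < m ∧ m ≤ 88)) ∨
  ((m = 0 ∨ m = 15 ∨ m = 30) ∧ -28 ≤ h_ ∧ h_ ≤ 29) ∨
  (m < 30 ∧ -28 ≤ m ∧ -28 ≤ h_ ∧ h_ ≤ 29)
instance (h_ : Int) (m : Int) : Decidable (Pre_timeInWords h_ m) := by unfold Pre_timeInWords; infer_instance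
def pvWitness_timeInWords : Int × Int := (5, 47)

def Spec_timeInWords (h_ : Int) (m : Int) (out : String) : Prop := out = timeInWords_alt h_ m
instance (h_ : Int) (m : Int) (out : String) : Decidable (Spec_timeInWords h_ m out) := by unfold Spec_timeInWords; infer_instance

-- ===== CLAIM (what is proved, stated in full; the proofs are below) =====
def Claim_equal_timeInWords : Prop := ∀ (h_ : Int) (m : Int), Dom_timeInWords h_ m → Pre_timeInWords h_ m → Spec_timeInWords h_ m (timeInWords h_ m)

-- ===== LEMMAS AND PROOFS =====

-- A's runtime-built 29-entry table equals B's literal table.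
lemma pv_table_eq :
    pvS1base ++ (PySem.List.pyRange 0 9 1).foldl
      (fun acc i => acc ++ [("twenty " ++ ((PySem.List.pyGet? pvS1base i).getD ""))]) [] = pvWords := by
  decide

lemma pv_join3 (a b c : String) : PySem.Str.join " " [a, b, c] = a ++ " " ++ b ++ " " ++ c := by
  simp [PySem.Str.join, PySem.Chars.join, List.intercalate, List.intersperse]
  have h2 : String.ofList (' ' :: (b.toList ++ ' ' :: c.toList)) = " " ++ b ++ " " ++ c := by
    rw [← String.ofList_toList (s := " " ++ b ++ " " ++ c)]; congr 1; simp
  rw [h2]; simp [String.append_assoc]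

lemma pv_join4 (a b c d : String) : PySem.Str.join " " [a, b, c, d] = a ++ " " ++ b ++ " " ++ c ++ " " ++ d := by
  simp [PySem.Str.join, PySem.Chars.join, List.intercalate, List.intersperse]
  have h2 : String.ofList (' ' :: (b.toList ++ ' ' :: (c.toList ++ ' ' :: d.toList))) = " " ++ b ++ " " ++ c ++ " " ++ d := by
    rw [← String.ofList_toList (s := " " ++ b ++ " " ++ c ++ " " ++ d)]; congr 1; simp
  rw [h2]; simp [String.append_assoc]

-- ===== VERDICT (by name: the statement is the Claim_ definition above) =====
theorem timeInWords_spec : Claim_equal_timeInWords := by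
  intro h_ m _ hpre
  unfold Spec_timeInWords timeInWords timeInWords_alt
  simp only [pv_table_eq]
  by_cases e0 : m = 0
  · subst e0
    simp [pvTemplates, PySem.Dict.get?, pv_join3, String.append_assoc]
  by_cases e15 : m = 15
  · subst e15
    simp [pvTemplates, PySem.Dict.get?, pv_join3]
  by_cases e30 : m = 30
  · subst e30
    simp [pvTemplates, PySem.Dict.get?, pv_join3]
  by_cases e45 : m = 45
  · subst e45
    simp [pvTemplates, PySem.Dict.get?, pv_join3]
  by_cases hlt : m < 30
  · simp [pvTemplates, PySem.Dict.get?, pv_join4, e0, e15, e30, e45,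
      Ne.symm e0, Ne.symm e15, Ne.symm e30, Ne.symm e45, hlt]
    simp [String.append_assoc]
  · simp [pvTemplates, PySem.Dict.get?, pv_join4, e0, e15, e30, e45,
      Ne.symm e0, Ne.symm e15, Ne.symm e30, Ne.symm e45, hlt]
    simp [String.append_assoc]
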